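-- pv_equiv track=rewrite | github.com/Rotem-Lev-Lehman/TomatosProject | crop_plants_by_depth/plants_cropper.py | find_central_group
-- ===== SOURCE A (Python) =====
-- def find_end_of_group(depth_x_array, from_point, to_point, steps, group_val):
--     prev = from_point
--     for x in range(from_point, to_point, steps):
--         if depth_x_array[x] != group_val:
--             return prev
--         prev = x
--     return prev
--
-- def find_start_and_end_of_group(depth_x_array, point, group_val):
--     start = find_end_of_group(depth_x_array, from_point=point, to_point=-1, steps=-1, group_val=group_val)
--     end = find_end_of_group(depth_x_array, from_point=point, to_point=len(depth_x_array), steps=1, group_val=group_val)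
--     return start, end
--
-- def find_central_group(depth_x_array, group_val=1):
--     center = int(len(depth_x_array) / 2)
--     if depth_x_array[center] == group_val:
--         return find_start_and_end_of_group(depth_x_array, center, group_val)
--     for i in range(int(len(depth_x_array) / 2)):
--         curr_left_ind = center - i
--         if depth_x_array[curr_left_ind] == group_val:
--             return find_start_and_end_of_group(depth_x_array, curr_left_ind, group_val)
--         curr_right_ind = center + i
--         if depth_x_array[curr_right_ind] == group_val:
--             return find_start_and_end_of_group(depth_x_array, curr_right_ind, group_val)
--     # can not get here...
--     raise Exception('There is no one in the group... Something is wrong here...')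
-- ===== SOURCE B (Python) =====
-- def find_central_group(depth_x_array, group_val=1):
--     center = int(len(depth_x_array) / 2)
--     # one pass: collect maximal contiguous runs of group_val as (start, end) pairs
--     runs = []
--     start = None
--     for j, v in enumerate(depth_x_array):
--         if v == group_val:
--             if start is None:
--                 start = j
--         elif start is not None:
--             runs.append((start, j - 1))
--             start = None
--     if start is not None:
--         runs.append((start, len(depth_x_array) - 1))
--     # pick the run whose nearest element is closest to center (first = leftmost wins ties)
--     best = None
--     for s, e in runs:
--         d = 0 if s <= center <= e else (center - e if e < center else s - center)
--         if best is None or d < best[0]: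
--             best = (d, s, e)
--     if best is None:
--         raise Exception('There is no one in the group... Something is wrong here...')
--     return best[1], best[2]
-- ===== Notes on version B (the rewrite author's own statement) =====
-- stated objective: alternative
-- what changed: Replaces A's concentric outward scan from the center plus two directional expansion walks by a single left-to-right pass that collects all maximal contiguous runs of group_val and then picks the run whose nearest element is closest to the center (leftmost run wins ties).
import Mathlib
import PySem

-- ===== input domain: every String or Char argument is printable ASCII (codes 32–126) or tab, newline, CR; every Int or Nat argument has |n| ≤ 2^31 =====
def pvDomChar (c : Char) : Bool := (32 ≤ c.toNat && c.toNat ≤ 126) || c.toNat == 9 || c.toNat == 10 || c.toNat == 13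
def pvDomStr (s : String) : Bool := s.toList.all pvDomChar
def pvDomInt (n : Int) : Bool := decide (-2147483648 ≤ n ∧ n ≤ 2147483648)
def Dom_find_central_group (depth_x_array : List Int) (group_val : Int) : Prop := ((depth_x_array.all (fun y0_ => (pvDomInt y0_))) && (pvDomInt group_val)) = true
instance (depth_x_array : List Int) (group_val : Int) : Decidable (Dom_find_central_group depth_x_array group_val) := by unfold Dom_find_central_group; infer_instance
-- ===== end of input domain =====

-- B replaces A's concentric scan outward from the center (plus two expansion walks)
-- by one left-to-right pass collecting maximal runs of group_val, then picking the
-- run nearest to the center (leftmost on ties); equal to A wherever A returns.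


-- ===== PORT A =====
-- for x in range(from_point, to_point, steps): if arr[x] != gv: return prev; prev = x
def pvFeogLoop (arr : List Int) (gv : Int) : Int → List Int → Int
  | prev, [] => prev
  | prev, x :: rest =>
    if PySem.List.pyGetD arr x 0 ≠ gv then prev else pvFeogLoop arr gv x rest

def find_end_of_group (depth_x_array : List Int) (from_point to_point steps group_val : Int) : Int :=
  pvFeogLoop depth_x_array group_val from_point (PySem.List.pyRange from_point to_point steps)

def find_start_and_end_of_group (depth_x_array : List Int) (point group_val : Int) : Int × Int :=
  (find_end_of_group depth_x_array point (-1) (-1) group_val,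
   find_end_of_group depth_x_array point (PySem.List.len depth_x_array) 1 group_val)

-- for i in range(int(len/2)): check center-i then center+i
def pvFcgLoop (arr : List Int) (gv center : Int) : List Int → Int × Int
  | [] => (0, 0)  -- Python raises Exception here; such inputs are excluded by Pre_
  | i :: rest =>
    if PySem.List.pyGetD arr (center - i) 0 = gv then
      find_start_and_end_of_group arr (center - i) gv
    else if PySem.List.pyGetD arr (center + i) 0 = gv then
      find_start_and_end_of_group arr (center + i) gv
    else pvFcgLoop arr gv center rest

def find_central_group (depth_x_array : List Int) (group_val : Int) : Int × Int :=
  let center := PySem.Int.floordiv (PySem.List.len depth_x_array) 2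
  if PySem.List.pyGetD depth_x_array center 0 = group_val then
    find_start_and_end_of_group depth_x_array center group_val
  else
    pvFcgLoop depth_x_array group_val center
      (PySem.List.pyRange 0 (PySem.Int.floordiv (PySem.List.len depth_x_array) 2) 1)

-- ===== PORT B =====
-- one enumerate pass: collect maximal contiguous runs of group_val as (start, end)
def pvRunsStep (gv : Int) (st : List (Int × Int) × Option Int) (jv : Int × Int) :
    List (Int × Int) × Option Int :=
  if jv.2 = gv then (st.1, if st.2 = none then some jv.1 else st.2)
  else
    match st.2 with
    | some s => (st.1 ++ [(s, jv.1 - 1)], none)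
    | none => st

def pvCollectRuns (arr : List Int) (gv : Int) : List (Int × Int) :=
  let st := (PySem.List.enumerate arr 0).foldl (pvRunsStep gv) ([], none)
  match st.2 with
  | some s => st.1 ++ [(s, PySem.List.len arr - 1)]
  | none => st.1

-- d = 0 if s <= center <= e else (center - e if e < center else s - center)
def pvDist (center : Int) (r : Int × Int) : Int :=
  if r.1 ≤ center ∧ center ≤ r.2 then 0 else if r.2 < center then center - r.2 else r.1 - center

def pvBestLoop (center : Int) : Option (Int × Int × Int) → List (Int × Int) → Option (Int × Int × Int)
  | best, [] => best
  | best, r :: rest =>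
    let d := pvDist center r
    let best' :=
      match best with
      | none => some (d, r.1, r.2)
      | some b => if d < b.1 then some (d, r.1, r.2) else some b
    pvBestLoop center best' rest

def find_central_group_alt (depth_x_array : List Int) (group_val : Int) : Int × Int :=
  let center := PySem.Int.floordiv (PySem.List.len depth_x_array) 2
  match pvBestLoop center none (pvCollectRuns depth_x_array group_val) with
  | some b => (b.2.1, b.2.2)
  | none => (0, 0)  -- Python raises Exception here; such inputs are excluded by Pre_

-- ===== PRECONDITION & SPEC =====
-- Pre_ excludes exactly the inputs on which A raises: the empty list (IndexError) and
-- inputs whose every occurrence of group_val lies outside A's scanned window around the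
-- center (A's custom Exception); on those A returns nothing.
def Pre_find_central_group (depth_x_array : List Int) (group_val : Int) : Prop :=
  depth_x_array ≠ [] ∧
    ∃ j < depth_x_array.length, depth_x_array.getD j 0 = group_val ∧
      ((j : Int) - ((depth_x_array.length / 2 : Nat) : Int)).natAbs ≤ depth_x_array.length / 2 - 1

instance (depth_x_array : List Int) (group_val : Int) : Decidable (Pre_find_central_group depth_x_array group_val) := by unfold Pre_find_central_group; infer_instance

def pvWitness_find_central_group : List Int × Int := ([1], 1)

def Spec_find_central_group (depth_x_array : List Int) (group_val : Int) (out : Int × Int) : Prop := out = find_central_group_alt depth_x_array group_val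
instance (depth_x_array : List Int) (group_val : Int) (out : Int × Int) : Decidable (Spec_find_central_group depth_x_array group_val out) := by unfold Spec_find_central_group; infer_instance

-- ===== CLAIM (what is proved, stated in full; the proofs are below) =====
def Claim_equal_find_central_group : Prop := ∀ (depth_x_array : List Int) (group_val : Int), Dom_find_central_group depth_x_array group_val → Pre_find_central_group depth_x_array group_val → Spec_find_central_group depth_x_array group_val (find_central_group depth_x_array group_val)

-- ===== LEMMAS AND PROOFS =====

lemma pv_feog_left (arr : List Int) (gv : Int) (s : Nat) :
    ∀ p : Nat, s ≤ p →
    (∀ k, s ≤ k → k ≤ p → arr.getD k 0 = gv) →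
    (s = 0 ∨ arr.getD (s-1) 0 ≠ gv) →
    pvFeogLoop arr gv (p : Int) (PySem.List.pyRange (p : Int) (-1) (-1)) = (s : Int) := by
  intro p
  induction p with
  | zero =>
    intro hs hall hmax
    interval_cases s
    rw [PySem.List.pyRange_neg_one_cons (by norm_num)]
    rw [PySem.List.pyRange_neg_one_eq_nil (by norm_num)]
    have h0 : PySem.List.pyGetD arr ((0:Nat):Int) 0 = gv := by
      rw [PySem.List.pyGetD_natCast]; exact hall 0 le_rfl le_rfl
    simp only [pvFeogLoop]
    rw [if_neg (not_not_intro (by exact_mod_cast h0))]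
  | succ p ih =>
    intro hs hall hmax
    have hG' : PySem.List.pyGetD arr ((p+1:Nat):Int) 0 = gv := by
      rw [PySem.List.pyGetD_natCast]; exact hall (p+1) hs le_rfl
    rw [PySem.List.pyRange_neg_one_cons (by omega)]
    rw [show ((p+1:Nat):Int) - 1 = ((p:Nat):Int) by omega]
    simp only [pvFeogLoop]
    rw [if_neg (not_not_intro hG')]
    rcases Nat.lt_or_ge p s with hlt | hge
    · have hsp : s = p + 1 := by omega
      subst hsp
      rcases hmax with h0 | hne
      · omega
      · have hne' : PySem.List.pyGetD arr ((p:Nat):Int) 0 ≠ gv := by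
          rw [PySem.List.pyGetD_natCast]; simpa using hne
        rw [PySem.List.pyRange_neg_one_cons (by omega)]
        simp only [pvFeogLoop]
        rw [if_pos hne']
    · have hGp' : PySem.List.pyGetD arr ((p:Nat):Int) 0 = gv := by
        rw [PySem.List.pyGetD_natCast]; exact hall p hge (by omega)
      have hIH := ih hge (fun k hk1 hk2 => hall k hk1 (by omega)) hmax
      rw [PySem.List.pyRange_neg_one_cons (by omega)] at hIH
      simp only [pvFeogLoop] at hIH
      rw [if_neg (not_not_intro hGp')] at hIH
      rw [PySem.List.pyRange_neg_one_cons (by omega)]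
      simp only [pvFeogLoop]
      rw [if_neg (not_not_intro hGp')]
      exact hIH

lemma pv_feog_right (arr : List Int) (gv : Int) (e : Nat) (he : e < arr.length)
    (hmax : e = arr.length - 1 ∨ arr.getD (e+1) 0 ≠ gv) :
    ∀ d p : Nat, e = p + d →
    (∀ k, p ≤ k → k ≤ e → arr.getD k 0 = gv) →
    pvFeogLoop arr gv (p : Int) (PySem.List.pyRange (p : Int) ((arr.length : Nat) : Int) 1) = (e : Int) := by
  intro d
  induction d with
  | zero =>
    intro p hpe hall
    have hpe' : p = e := by omega
    subst hpe'
    have hG' : PySem.List.pyGetD arr ((p:Nat):Int) 0 = gv := by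
      rw [PySem.List.pyGetD_natCast]; exact hall p le_rfl le_rfl
    rw [PySem.List.pyRange_one_cons (by omega)]
    simp only [pvFeogLoop]
    rw [if_neg (not_not_intro hG')]
    rw [show ((p:Nat):Int) + 1 = ((p+1:Nat):Int) by omega]
    rcases Nat.lt_or_ge (p+1) arr.length with hlt | hge
    · rcases hmax with h0 | hne
      · omega
      · have hne' : PySem.List.pyGetD arr ((p+1:Nat):Int) 0 ≠ gv := by
          rw [PySem.List.pyGetD_natCast]; simpa using hne
        rw [PySem.List.pyRange_one_cons (by omega)]
        simp only [pvFeogLoop]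
        rw [if_pos hne']
    · rw [PySem.List.pyRange_one_eq_nil (by omega)]
      simp [pvFeogLoop]
  | succ d ih =>
    intro p hpe hall
    have hG' : PySem.List.pyGetD arr ((p:Nat):Int) 0 = gv := by
      rw [PySem.List.pyGetD_natCast]; exact hall p le_rfl (by omega)
    have hGp1 : PySem.List.pyGetD arr ((p+1:Nat):Int) 0 = gv := by
      rw [PySem.List.pyGetD_natCast]; exact hall (p+1) (by omega) (by omega)
    rw [PySem.List.pyRange_one_cons (by omega)]
    simp only [pvFeogLoop]
    rw [if_neg (not_not_intro hG')]
    rw [show ((p:Nat):Int) + 1 = ((p+1:Nat):Int) by omega]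
    have hIH := ih (p+1) (by omega) (fun k hk1 hk2 => hall k (by omega) hk2)
    rw [PySem.List.pyRange_one_cons (by omega)] at hIH
    simp only [pvFeogLoop] at hIH
    rw [if_neg (not_not_intro hGp1)] at hIH
    rw [PySem.List.pyRange_one_cons (by omega)]
    simp only [pvFeogLoop]
    rw [if_neg (not_not_intro hGp1)]
    exact hIH

lemma pv_fsae_run (arr : List Int) (gv : Int) (s e p : Nat)
    (hsp : s ≤ p) (hpe : p ≤ e) (he : e < arr.length)
    (hall : ∀ k, s ≤ k → k ≤ e → arr.getD k 0 = gv)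
    (hl : s = 0 ∨ arr.getD (s-1) 0 ≠ gv)
    (hr : e = arr.length - 1 ∨ arr.getD (e+1) 0 ≠ gv) :
    find_start_and_end_of_group arr (p : Int) gv = ((s : Int), (e : Int)) := by
  unfold find_start_and_end_of_group find_end_of_group
  refine Prod.ext ?_ ?_
  · simpa using pv_feog_left arr gv s p hsp (fun k h1 h2 => hall k h1 (by omega)) hl
  · have := pv_feog_right arr gv e he hr (e - p) p (by omega) (fun k h1 h2 => hall k (by omega) h2)
    simpa [PySem.List.len_eq] using this

def pvInv (arr : List Int) (gv : Int) (m : Nat) (st : List (Int × Int) × Option Int) : Prop :=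
  (∀ r ∈ st.1, ∃ sn en : Nat, r = ((sn : Int), (en : Int)) ∧ sn ≤ en ∧ en + 1 < m ∧
      (∀ k, sn ≤ k → k ≤ en → arr.getD k 0 = gv) ∧
      (sn = 0 ∨ arr.getD (sn-1) 0 ≠ gv) ∧ arr.getD (en+1) 0 ≠ gv) ∧
  (∀ s, st.2 = some s → ∃ sn : Nat, s = (sn:Int) ∧ sn < m ∧
      (∀ k, sn ≤ k → k < m → arr.getD k 0 = gv) ∧
      (sn = 0 ∨ arr.getD (sn-1) 0 ≠ gv) ∧ (∀ r ∈ st.1, r.2 < (sn:Int))) ∧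
  (st.2 = none → m = 0 ∨ arr.getD (m-1) 0 ≠ gv) ∧
  (∀ p : Nat, p < m → arr.getD p 0 = gv →
      (∃ r ∈ st.1, r.1 ≤ (p:Int) ∧ (p:Int) ≤ r.2) ∨ (∃ s, st.2 = some s ∧ s ≤ (p:Int))) ∧
  List.Pairwise (fun r r' : Int × Int => r.2 < r'.1) st.1

lemma pv_inv (arr : List Int) (gv : Int) :
    ∀ m, m ≤ arr.length →
    pvInv arr gv m ((PySem.List.enumerate (arr.take m) 0).foldl (pvRunsStep gv) ([], none)) := by
  intro m
  induction m with
  | zero =>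
    intro _
    simp [pvInv]
  | succ m ih =>
    intro hm
    have hmlt : m < arr.length := by omega
    have hIH := ih (by omega)
    have hget : arr.getD m 0 = arr[m] := List.getD_eq_getElem arr 0 hmlt
    have htake : arr.take (m+1) = arr.take m ++ [arr[m]] := by
      rw [List.take_add_one]
      simp [List.getElem?_eq_getElem hmlt]
    have hlen : (arr.take m).length = m := by simp [List.length_take]; omega
    have hfold : (PySem.List.enumerate (arr.take (m+1)) 0).foldl (pvRunsStep gv) ([], none)
        = pvRunsStep gv ((PySem.List.enumerate (arr.take m) 0).foldl (pvRunsStep gv) ([], none)) ((m:Int), arr[m]) := by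
      rw [htake, PySem.List.enumerate_append, List.foldl_append]
      simp [PySem.List.enumerate, hlen]
    rw [hfold]
    set st := (PySem.List.enumerate (arr.take m) 0).foldl (pvRunsStep gv) ([], none) with hst
    obtain ⟨hruns, hsome, hnone, hcov, hpw⟩ := hIH
    by_cases hv : arr[m] = gv
    · by_cases hs2 : st.2 = none
      · -- open a new run at m
        have hst' : pvRunsStep gv st ((m:Int), arr[m]) = (st.1, some (m:Int)) := by
          simp [pvRunsStep, hv, hs2]
        rw [hst']
        refine ⟨?_, ?_, ?_, ?_, ?_⟩
        · intro r hr
          obtain ⟨sn, en, h1, h2, h3, h4, h5, h6⟩ := hruns r hr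
          exact ⟨sn, en, h1, h2, by omega, h4, h5, h6⟩
        · intro s hs
          injection hs with hs
          refine ⟨m, hs.symm, by omega, ?_, ?_, ?_⟩
          · intro k hk1 hk2
            have : k = m := by omega
            rw [this, hget]; exact hv
          · rcases hnone hs2 with h | h
            · left; omega
            · right; exact h
          · intro r hr
            obtain ⟨sn, en, h1, h2, h3, _, _, _⟩ := hruns r hr
            rw [h1]; simp; omega
        · intro h; simp at h
        · intro p hp hGp
          rcases Nat.lt_or_ge p m with hpm | hpm
          · rcases hcov p hpm hGp with ⟨r, hr, h1, h2⟩ | ⟨s, hs, _⟩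
            · exact Or.inl ⟨r, hr, h1, h2⟩
            · rw [hs2] at hs; cases hs
          · have : p = m := by omega
            subst this
            exact Or.inr ⟨(p:Int), rfl, le_rfl⟩
        · exact hpw
      · -- continue the open run
        obtain ⟨s, hs⟩ := Option.ne_none_iff_exists'.mp hs2
        obtain ⟨sn, hsn, hsnm, hallk, hlmax, hrlt⟩ := hsome s hs
        have hst' : pvRunsStep gv st ((m:Int), arr[m]) = (st.1, st.2) := by
          simp [pvRunsStep, hv, hs]
        rw [hst']
        refine ⟨?_, ?_, ?_, ?_, ?_⟩
        · intro r hr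
          obtain ⟨sn', en', h1, h2, h3, h4, h5, h6⟩ := hruns r hr
          exact ⟨sn', en', h1, h2, by omega, h4, h5, h6⟩
        · intro s' hs'
          rw [hs] at hs'
          injection hs' with hs'
          subst hs'
          refine ⟨sn, hsn, by omega, ?_, hlmax, hrlt⟩
          intro k hk1 hk2
          rcases Nat.lt_or_ge k m with hkm | hkm
          · exact hallk k hk1 hkm
          · have : k = m := by omega
            rw [this, hget]; exact hv
        · intro h; rw [hs] at h; cases h
        · intro p hp hGp
          rcases Nat.lt_or_ge p m with hpm | hpm
          · rcases hcov p hpm hGp with ⟨r, hr, h1, h2⟩ | ⟨s', hs', hle⟩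
            · exact Or.inl ⟨r, hr, h1, h2⟩
            · exact Or.inr ⟨s', hs', hle⟩
          · have : p = m := by omega
            subst this
            refine Or.inr ⟨s, hs, ?_⟩
            rw [hsn]; exact_mod_cast Nat.le_of_lt hsnm
        · exact hpw
    · by_cases hs2 : st.2 = none
      · -- nothing open, nothing to close
        have hst' : pvRunsStep gv st ((m:Int), arr[m]) = st := by
          simp [pvRunsStep, hv, hs2]
        rw [hst']
        refine ⟨?_, ?_, ?_, ?_, ?_⟩
        · intro r hr
          obtain ⟨sn', en', h1, h2, h3, h4, h5, h6⟩ := hruns r hr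
          exact ⟨sn', en', h1, h2, by omega, h4, h5, h6⟩
        · intro s hs
          rw [hs2] at hs; cases hs
        · intro _
          right
          have h11 : m + 1 - 1 = m := rfl
          rw [h11, hget]; exact hv
        · intro p hp hGp
          rcases Nat.lt_or_ge p m with hpm | hpm
          · exact hcov p hpm hGp
          · have : p = m := by omega
            subst this
            rw [hget] at hGp; exact absurd hGp hv
        · exact hpw
      · -- close the open run: append (s, m-1)
        obtain ⟨s, hs⟩ := Option.ne_none_iff_exists'.mp hs2
        obtain ⟨sn, hsn, hsnm, hallk, hlmax, hrlt⟩ := hsome s hs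
        have hst' : pvRunsStep gv st ((m:Int), arr[m]) = (st.1 ++ [(s, (m:Int) - 1)], none) := by
          simp [pvRunsStep, hv, hs]
        rw [hst']
        have hm1 : (m:Int) - 1 = ((m-1:Nat):Int) := by omega
        refine ⟨?_, ?_, ?_, ?_, ?_⟩
        · intro r hr
          rcases List.mem_append.mp hr with hr | hr
          · obtain ⟨sn', en', h1, h2, h3, h4, h5, h6⟩ := hruns r hr
            exact ⟨sn', en', h1, h2, by omega, h4, h5, h6⟩
          · rw [List.mem_singleton] at hr
            subst hr
            refine ⟨sn, m-1, by rw [hsn, hm1], by omega, by omega, ?_, hlmax, ?_⟩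
            · intro k hk1 hk2
              exact hallk k hk1 (by omega)
            · have : m - 1 + 1 = m := by omega
              rw [this, hget]; exact hv
        · intro s' hs'; cases hs'
        · intro _
          right
          have : m + 1 - 1 = m := by omega
          rw [this, hget]; exact hv
        · intro p hp hGp
          rcases Nat.lt_or_ge p m with hpm | hpm
          · rcases hcov p hpm hGp with ⟨r, hr, h1, h2⟩ | ⟨s', hs', hle⟩
            · exact Or.inl ⟨r, List.mem_append_left _ hr, h1, h2⟩
            · rw [hs] at hs'; injection hs' with hs'; subst hs'
              refine Or.inl ⟨(s, (m:Int) - 1), List.mem_append_right _ (List.mem_singleton.mpr rfl), hle, ?_⟩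
              simp; omega
          · have : p = m := by omega
            subst this
            rw [hget] at hGp; exact absurd hGp hv
        · rw [List.pairwise_append]
          refine ⟨hpw, List.pairwise_singleton _ _, ?_⟩
          intro r hr r' hr'
          rw [List.mem_singleton] at hr'
          subst hr'
          simpa [hsn] using hrlt r hr

lemma pv_runs_spec (arr : List Int) (gv : Int) :
    (∀ r ∈ pvCollectRuns arr gv, ∃ sn en : Nat, r = ((sn:Int), (en:Int)) ∧ sn ≤ en ∧ en < arr.length ∧
       (∀ k, sn ≤ k → k ≤ en → arr.getD k 0 = gv) ∧ (sn = 0 ∨ arr.getD (sn-1) 0 ≠ gv) ∧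
       (en = arr.length - 1 ∨ arr.getD (en+1) 0 ≠ gv)) ∧
    (∀ p : Nat, p < arr.length → arr.getD p 0 = gv →
       ∃ r ∈ pvCollectRuns arr gv, r.1 ≤ (p:Int) ∧ (p:Int) ≤ r.2) ∧
    List.Pairwise (fun r r' : Int × Int => r.2 < r'.1) (pvCollectRuns arr gv) := by
  have hInv := pv_inv arr gv arr.length le_rfl
  rw [List.take_length] at hInv
  obtain ⟨hruns, hsome, hnone, hcov, hpw⟩ := hInv
  unfold pvCollectRuns
  set st := (PySem.List.enumerate arr 0).foldl (pvRunsStep gv) ([], none) with hst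
  rcases hs2 : st.2 with _ | s
  · simp only [hs2]
    refine ⟨?_, ?_, hpw⟩
    · intro r hr
      obtain ⟨sn, en, h1, h2, h3, h4, h5, h6⟩ := hruns r hr
      exact ⟨sn, en, h1, h2, by omega, h4, h5, Or.inr h6⟩
    · intro p hp hGp
      rcases hcov p hp hGp with ⟨r, hr, h1, h2⟩ | ⟨s, hs, _⟩
      · exact ⟨r, hr, h1, h2⟩
      · rw [hs2] at hs; cases hs
  · simp only [hs2]
    obtain ⟨sn, hsn, hsnm, hallk, hlmax, hrlt⟩ := hsome s hs2
    have hn1 : PySem.List.len arr - 1 = ((arr.length - 1 : Nat) : Int) := by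
      rw [PySem.List.len_eq]; omega
    refine ⟨?_, ?_, ?_⟩
    · intro r hr
      rcases List.mem_append.mp hr with hr | hr
      · obtain ⟨sn', en', h1, h2, h3, h4, h5, h6⟩ := hruns r hr
        exact ⟨sn', en', h1, h2, by omega, h4, h5, Or.inr h6⟩
      · rw [List.mem_singleton] at hr
        subst hr
        refine ⟨sn, arr.length - 1, by rw [hsn, hn1], by omega, by omega, ?_, hlmax, Or.inl rfl⟩
        intro k hk1 hk2
        exact hallk k hk1 (by omega)
    · intro p hp hGp
      rcases hcov p hp hGp with ⟨r, hr, h1, h2⟩ | ⟨s', hs', hle⟩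
      · exact ⟨r, List.mem_append_left _ hr, h1, h2⟩
      · rw [hs2] at hs'; injection hs' with hs'; subst hs'
        refine ⟨(s, PySem.List.len arr - 1), List.mem_append_right _ (List.mem_singleton.mpr rfl), hle, ?_⟩
        simp only [hn1]; exact_mod_cast by omega
    · rw [List.pairwise_append]
      refine ⟨hpw, List.pairwise_singleton _ _, ?_⟩
      intro r hr r' hr'
      rw [List.mem_singleton] at hr'
      subst hr'
      simpa [hsn] using hrlt r hr

lemma pv_best_keep (center : Int) (b : Int × Int × Int) :
    ∀ rs : List (Int × Int), (∀ r ∈ rs, b.1 ≤ pvDist center r) →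
    pvBestLoop center (some b) rs = some b := by
  intro rs
  induction rs with
  | nil => intro _; rfl
  | cons r rest ih =>
    intro h
    have hb := h r (List.mem_cons_self)
    simp only [pvBestLoop]
    rw [if_neg (by omega)]
    exact ih (fun r' hr' => h r' (List.mem_cons_of_mem _ hr'))

lemma pv_best_mid (center : Int) (rstar : Int × Int) (post : List (Int × Int))
    (hpost : ∀ r ∈ post, pvDist center rstar ≤ pvDist center r) :
    ∀ pre : List (Int × Int), ∀ b : Int × Int × Int,
    pvDist center rstar < b.1 →
    (∀ r ∈ pre, pvDist center rstar < pvDist center r) →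
    pvBestLoop center (some b) (pre ++ rstar :: post) = some (pvDist center rstar, rstar.1, rstar.2) := by
  intro pre
  induction pre with
  | nil =>
    intro b hb _
    simp only [List.nil_append, pvBestLoop]
    rw [if_pos hb]
    exact pv_best_keep center _ post hpost
  | cons r pre' ih =>
    intro b hb hpre
    have hr := hpre r (List.mem_cons_self)
    simp only [List.cons_append, pvBestLoop]
    by_cases hc : pvDist center r < b.1
    · rw [if_pos hc]
      exact ih _ hr (fun r' hr' => hpre r' (List.mem_cons_of_mem _ hr'))
    · rw [if_neg hc]
      exact ih _ hb (fun r' hr' => hpre r' (List.mem_cons_of_mem _ hr'))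

lemma pv_best_main (center : Int) (rstar : Int × Int) (pre post : List (Int × Int))
    (hpre : ∀ r ∈ pre, pvDist center rstar < pvDist center r)
    (hpost : ∀ r ∈ post, pvDist center rstar ≤ pvDist center r) :
    pvBestLoop center none (pre ++ rstar :: post) = some (pvDist center rstar, rstar.1, rstar.2) := by
  cases pre with
  | nil =>
    simp only [List.nil_append, pvBestLoop]
    exact pv_best_keep center _ post hpost
  | cons r pre' =>
    have hr := hpre r (List.mem_cons_self)
    simp only [List.cons_append, pvBestLoop]
    exact pv_best_mid center rstar post hpost pre' _ hr
      (fun r' hr' => hpre r' (List.mem_cons_of_mem _ hr'))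

lemma pv_scan (arr : List Int) (gv : Int) (c : Nat) (hc2 : 2 * c ≤ arr.length)
    (hGc : arr.getD c 0 ≠ gv) :
    ∀ fuel i : Nat, fuel = c - i → i ≤ c →
    (∀ t, t < i → arr.getD (c - t) 0 ≠ gv ∧ arr.getD (c + t) 0 ≠ gv) →
    (∃ j, j < arr.length ∧ arr.getD j 0 = gv ∧
       (if j ≤ c then c - j else j - c) ≤ c - 1 ∧ i ≤ (if j ≤ c then c - j else j - c)) →
    ∃ h, h < arr.length ∧ arr.getD h 0 = gv ∧
      (if h ≤ c then c - h else h - c) ≤ c - 1 ∧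
      (∀ t, t < (if h ≤ c then c - h else h - c) → arr.getD (c - t) 0 ≠ gv ∧ arr.getD (c + t) 0 ≠ gv) ∧
      (c < h → arr.getD (c - (h - c)) 0 ≠ gv) ∧
      pvFcgLoop arr gv (c : Int) (PySem.List.pyRange (i : Int) (c : Int) 1)
        = find_start_and_end_of_group arr ((h : Nat) : Int) gv := by
  intro fuel
  induction fuel with
  | zero =>
    intro i hfuel hi hprev hex
    obtain ⟨j, hj, hGj, hd1, hd2⟩ := hex
    exfalso
    by_cases hjc : j ≤ c
    · simp only [if_pos hjc] at hd1 hd2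
      have : j = c := by omega
      subst this
      exact hGc hGj
    · simp only [if_neg hjc] at hd1 hd2
      omega
  | succ fuel ih =>
    intro i hfuel hi hprev hex
    obtain ⟨j, hj, hGj, hd1, hd2⟩ := hex
    have hilt : i < c := by omega
    have hn1 : c < arr.length := by
      by_cases h0 : c = 0
      · omega
      · omega
    rw [PySem.List.pyRange_one_cons (by exact_mod_cast hilt)]
    simp only [pvFcgLoop]
    rw [show (c:Int) - (i:Int) = ((c-i:Nat):Int) by omega]
    rw [show (c:Int) + (i:Int) = ((c+i:Nat):Int) by omega]
    by_cases hL : arr.getD (c-i) 0 = gv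
    · have hL' : PySem.List.pyGetD arr ((c-i:Nat):Int) 0 = gv := by
        rw [PySem.List.pyGetD_natCast]; exact hL
      rw [if_pos hL']
      refine ⟨c - i, by omega, hL, ?_, ?_, ?_, rfl⟩
      · rw [if_pos (by omega)]; omega
      · rw [if_pos (by omega)]
        intro t ht
        exact hprev t (by omega)
      · intro hcc; omega
    · have hL' : ¬ PySem.List.pyGetD arr ((c-i:Nat):Int) 0 = gv := by
        rw [PySem.List.pyGetD_natCast]; exact hL
      rw [if_neg hL']
      by_cases hR : arr.getD (c+i) 0 = gv
      · have hi0 : i ≠ 0 := by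
          intro h0; subst h0; simp at hR; exact hL (by simpa using hR)
        have hR' : PySem.List.pyGetD arr ((c+i:Nat):Int) 0 = gv := by
          rw [PySem.List.pyGetD_natCast]; exact hR
        rw [if_pos hR']
        refine ⟨c + i, by omega, hR, ?_, ?_, ?_, rfl⟩
        · rw [if_neg (by omega)]; omega
        · rw [if_neg (by omega)]
          intro t ht
          exact hprev t (by omega)
        · intro _
          rw [show c + i - c = i from by omega, show c - i = c - i from rfl]
          exact hL
      · have hR' : ¬ PySem.List.pyGetD arr ((c+i:Nat):Int) 0 = gv := by
          rw [PySem.List.pyGetD_natCast]; exact hR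
        rw [if_neg hR']
        have hprev' : ∀ t, t < i + 1 → arr.getD (c - t) 0 ≠ gv ∧ arr.getD (c + t) 0 ≠ gv := by
          intro t ht
          rcases Nat.lt_or_ge t i with h | h
          · exact hprev t h
          · have : t = i := by omega
            subst this
            exact ⟨hL, hR⟩
        have hex' : ∃ j, j < arr.length ∧ arr.getD j 0 = gv ∧
            (if j ≤ c then c - j else j - c) ≤ c - 1 ∧ i + 1 ≤ (if j ≤ c then c - j else j - c) := by
          refine ⟨j, hj, hGj, hd1, ?_⟩
          by_cases hjc : j ≤ c
          · simp only [if_pos hjc] at hd2 ⊢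
            rcases Nat.lt_or_ge i (c - j) with h | h
            · omega
            · have : j = c - i := by omega
              subst this
              exact absurd hGj hL
          · simp only [if_neg hjc] at hd2 ⊢
            rcases Nat.lt_or_ge i (j - c) with h | h
            · omega
            · have : j = c + i := by omega
              subst this
              exact absurd hGj hR
        have := ih (i+1) (by omega) (by omega) hprev' hex'
        rw [show (i:Int) + 1 = ((i+1:Nat):Int) by omega]
        exact this

lemma pvDist_cast (c sn en : Nat) : pvDist (c:Int) ((sn:Int),(en:Int)) =
    if sn ≤ c ∧ c ≤ en then 0 else if en < c then (c:Int) - (en:Int) else (sn:Int) - (c:Int) := by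
  simp only [pvDist]
  split_ifs <;> omega

lemma pv_select (arr : List Int) (gv : Int) (c : Nat) (h : Nat)
    (hh : h < arr.length) (hGh : arr.getD h 0 = gv)
    (hfirst : ∀ t, t < (if h ≤ c then c - h else h - c) →
       arr.getD (c - t) 0 ≠ gv ∧ arr.getD (c + t) 0 ≠ gv)
    (hside : c < h → arr.getD (c - (h - c)) 0 ≠ gv) :
    ∃ sn en : Nat, sn ≤ h ∧ h ≤ en ∧ en < arr.length ∧
      (∀ k, sn ≤ k → k ≤ en → arr.getD k 0 = gv) ∧
      (sn = 0 ∨ arr.getD (sn-1) 0 ≠ gv) ∧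
      (en = arr.length - 1 ∨ arr.getD (en+1) 0 ≠ gv) ∧
      pvBestLoop (c:Int) none (pvCollectRuns arr gv)
        = some (pvDist (c:Int) ((sn:Int),(en:Int)), (sn:Int), (en:Int)) := by
  set dh : Nat := if h ≤ c then c - h else h - c with hdh
  have E1 : ∀ k : Nat, k ≤ c → c - k < dh → arr.getD k 0 ≠ gv := by
    intro k hk hlt
    have := (hfirst (c-k) hlt).1
    rwa [show c - (c-k) = k from by omega] at this
  have E2 : ∀ k : Nat, c ≤ k → k - c < dh → arr.getD k 0 ≠ gv := by
    intro k hk hlt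
    have := (hfirst (k-c) hlt).2
    rwa [show c + (k-c) = k from by omega] at this
  obtain ⟨C1, C2, C3⟩ := pv_runs_spec arr gv
  obtain ⟨r, hr, hr1, hr2⟩ := C2 h hh hGh
  obtain ⟨sn, en, hreq, hsnen, henlt, hallk, hlft, hrgt⟩ := C1 r hr
  subst hreq
  simp only at hr1 hr2
  have hsnh : sn ≤ h := by exact_mod_cast hr1
  have hhen : h ≤ en := by exact_mod_cast hr2
  obtain ⟨pre, post, heq⟩ := List.append_of_mem hr
  have hcross1 : ∀ r' ∈ pre, r'.2 < (sn:Int) := by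
    rw [heq] at C3
    intro r' hr'
    exact ((List.pairwise_append.mp C3).2.2 r' hr' _ (List.mem_cons_self))
  have hcross2 : ∀ r' ∈ post, (en:Int) < r'.1 := by
    rw [heq] at C3
    intro r' hr'
    exact (List.pairwise_cons.mp (List.pairwise_append.mp C3).2.1).1 r' hr'
  -- exhaustive position cases for the chosen run
  have hcase : (sn ≤ c ∧ c ≤ en) ∨ en < c ∨ c < sn := by omega
  -- distance of the chosen run is at most dh
  have hdr : pvDist (c:Int) ((sn:Int),(en:Int)) =
      if sn ≤ c ∧ c ≤ en then 0 else if en < c then (c:Int) - (en:Int) else (sn:Int) - (c:Int) :=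
    pvDist_cast c sn en
  have hpre : ∀ r' ∈ pre, pvDist (c:Int) ((sn:Int),(en:Int)) < pvDist (c:Int) r' := by
    intro r' hr'
    have hr'mem : r' ∈ pvCollectRuns arr gv := by rw [heq]; exact List.mem_append_left _ hr'
    obtain ⟨sn', en', hreq', hsnen', henlt', hallk', _, _⟩ := C1 r' hr'mem
    subst hreq'
    have hlt : en' < sn := by
      have := hcross1 _ hr'
      simp only at this
      exact_mod_cast this
    rw [hdr, pvDist_cast]
    rcases hcase with hA | hB | hC
    · rw [if_pos hA, if_neg (by omega), if_pos (by omega)]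
      omega
    · rw [if_neg (by omega), if_pos hB, if_neg (by omega), if_pos (by omega)]
      omega
    · -- chosen run right of center: h > c, dh = h - c, sn - c ≤ dh
      have hhc : c < h := by omega
      have hdh' : dh = h - c := by rw [hdh, if_neg (by omega)]
      have hsc : sn - c ≤ dh := by omega
      rw [if_neg (by omega), if_neg (by omega)]
      by_cases hec : en' < c
      · rw [if_neg (by omega), if_pos hec]
        -- need c - en' > sn - c
        by_cases hq : (c:Int) - (en':Int) > (sn:Int) - (c:Int)
        · omega
        · exfalso
          have hGe : arr.getD en' 0 = gv := hallk' en' hsnen' le_rfl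
          have hle : c - en' ≤ dh := by omega
          rcases Nat.lt_or_ge (c - en') dh with hlt2 | hge2
          · exact E1 en' (by omega) hlt2 hGe
          · have : c - (h - c) = en' := by omega
            exact (this ▸ hside hhc) hGe
      · -- en' ≥ c: impossible
        exfalso
        by_cases hsc' : sn' ≤ c
        · have hGc : arr.getD c 0 = gv := hallk' c hsc' (by omega)
          exact E2 c le_rfl (by omega) hGc
        · have hGs : arr.getD sn' 0 = gv := hallk' sn' le_rfl (by omega)
          exact E2 sn' (by omega) (by omega) hGs
  have hpost : ∀ r' ∈ post, pvDist (c:Int) ((sn:Int),(en:Int)) ≤ pvDist (c:Int) r' := by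
    intro r' hr'
    have hr'mem : r' ∈ pvCollectRuns arr gv := by
      rw [heq]; exact List.mem_append_right _ (List.mem_cons_of_mem _ hr')
    obtain ⟨sn', en', hreq', hsnen', henlt', hallk', _, _⟩ := C1 r' hr'mem
    subst hreq'
    have hlt : en < sn' := by
      have := hcross2 _ hr'
      simp only at this
      exact_mod_cast this
    rw [hdr, pvDist_cast]
    rcases hcase with hA | hB | hC
    · rw [if_pos hA]
      split_ifs <;> omega
    · -- chosen run left of center: h < c, dh = c - h ≥ c - en
      have hhc : h < c := by omega
      have hdh' : dh = c - h := by rw [hdh, if_pos (by omega)]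
      rw [if_neg (by omega), if_pos hB]
      by_cases hsc' : sn' ≤ c
      · exfalso
        have hGs : arr.getD sn' 0 = gv := hallk' sn' le_rfl hsnen'
        exact E1 sn' hsc' (by omega) hGs
      · rw [if_neg (by omega), if_neg (by omega)]
        by_cases hq : (sn':Int) - (c:Int) ≥ (c:Int) - (en:Int)
        · omega
        · exfalso
          have hGs : arr.getD sn' 0 = gv := hallk' sn' le_rfl hsnen'
          exact E2 sn' (by omega) (by omega) hGs
    · rw [if_neg (by omega), if_neg (by omega), if_neg (by omega), if_neg (by omega)]
      omega
  refine ⟨sn, en, hsnh, hhen, henlt, hallk, hlft, hrgt, ?_⟩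
  rw [heq]
  exact pv_best_main (c:Int) _ pre post hpre hpost

theorem pv_main : ∀ (depth_x_array : List Int) (group_val : Int),
    Pre_find_central_group depth_x_array group_val →
    find_central_group depth_x_array group_val = find_central_group_alt depth_x_array group_val := by
  intro arr gv hpre
  obtain ⟨hne, j, hj, hGj, hdist⟩ := hpre
  have hn1 : 1 ≤ arr.length := by
    cases arr with
    | nil => exact absurd rfl hne
    | cons a l => simp
  set c : Nat := arr.length / 2 with hc
  have hc2 : 2 * c ≤ arr.length := by omega
  have hcn : c < arr.length := by omega
  have hcenter : PySem.Int.floordiv (PySem.List.len arr) 2 = ((c:Nat):Int) := by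
    rw [PySem.List.len_eq]
    exact_mod_cast PySem.Int.floordiv_natCast arr.length 2
  have hdistj : (if j ≤ c then c - j else j - c) ≤ c - 1 := by
    by_cases h : j ≤ c
    · rw [if_pos h]; omega
    · rw [if_neg h]; omega
  simp only [find_central_group, find_central_group_alt, hcenter]
  by_cases hGc : arr.getD c 0 = gv
  · -- the center itself is in the group
    have hGc' : PySem.List.pyGetD arr ((c:Nat):Int) 0 = gv := by
      rw [PySem.List.pyGetD_natCast]; exact hGc
    rw [if_pos hGc']
    obtain ⟨sn, en, hsnh, hhen, henlt, hallk, hlft, hrgt, hbest⟩ :=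
      pv_select arr gv c c hcn hGc
        (by intro t ht; rw [if_pos le_rfl] at ht; omega)
        (by intro h; omega)
    rw [hbest, pv_fsae_run arr gv sn en c hsnh hhen henlt hallk hlft hrgt]
  · -- scan outward from the center
    have hGc' : ¬ PySem.List.pyGetD arr ((c:Nat):Int) 0 = gv := by
      rw [PySem.List.pyGetD_natCast]; exact hGc
    rw [if_neg hGc']
    have hex : ∃ j, j < arr.length ∧ arr.getD j 0 = gv ∧
        (if j ≤ c then c - j else j - c) ≤ c - 1 ∧ 0 ≤ (if j ≤ c then c - j else j - c) :=
      ⟨j, hj, hGj, hdistj, Nat.zero_le _⟩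
    obtain ⟨h, hhlt, hGh, hd1, hfirst, hside, hloop⟩ :=
      pv_scan arr gv c hc2 hGc (c - 0) 0 rfl (Nat.zero_le _) (by intro t ht; omega) hex
    simp only [Nat.cast_zero] at hloop
    rw [hloop]
    obtain ⟨sn, en, hsnh, hhen, henlt, hallk, hlft, hrgt, hbest⟩ :=
      pv_select arr gv c h hhlt hGh hfirst hside
    rw [hbest, pv_fsae_run arr gv sn en h hsnh hhen henlt hallk hlft hrgt]

-- ===== VERDICT (by name: the statement is the Claim_ definition above) =====
theorem find_central_group_spec : Claim_equal_find_central_group := by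
  intro depth_x_array group_val _ hpre
  exact pv_main depth_x_array group_val hpre
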